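-- pv_equiv track=rewrite | github.com/nvmnghia/INT3305-1-Group-5-Assignment | Ex6/linear_cyclic_convolution.py | convert_arr_to_custom_linear_matrix
-- ===== SOURCE A (Python) =====
-- def convert_arr_to_custom_linear_matrix(vec1,vec2):
--     len1 = len(vec1)
--     len2 = len(vec2)
--     heightMatrix = len1 + len2 - 1
--     widthMatrix = len2
--     arr = [[0 for i in range(widthMatrix)] for i in range(heightMatrix)]
--     countHeight = 0
--     while(countHeight < heightMatrix):
--         countWidth = 0
--         while(countWidth < widthMatrix):
--             if(((countHeight - countWidth) < len(vec1)) & ((countHeight - countWidth) >= 0)):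
--                 arr[countHeight][countWidth] = vec1[countHeight - countWidth]
--             else:
--                 arr[countHeight][countWidth] = 0
--             countWidth+=1
--         countHeight+=1
--     return arr
-- ===== SOURCE B (Python) =====
-- def convert_arr_to_custom_linear_matrix(vec1, vec2):
--     len1 = len(vec1)
--     len2 = len(vec2)
--     arr = [[0] * len2 for _ in range(len1 + len2 - 1)]
--     for j in range(len2):
--         for k in range(len1):
--             arr[j + k][j] = vec1[k]
--     return arr
-- ===== Notes on version B (the rewrite author's own statement) =====
-- stated objective: alternative
-- what changed: Instead of scanning every cell of the (len1+len2-1) x len2 matrix and testing an in-band guard per cell, B zero-initialises the matrix and writes only the len1*len2 nonzero diagonal-band cells by scattering vec1 down each column, with no conditional at all.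
import Mathlib
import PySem

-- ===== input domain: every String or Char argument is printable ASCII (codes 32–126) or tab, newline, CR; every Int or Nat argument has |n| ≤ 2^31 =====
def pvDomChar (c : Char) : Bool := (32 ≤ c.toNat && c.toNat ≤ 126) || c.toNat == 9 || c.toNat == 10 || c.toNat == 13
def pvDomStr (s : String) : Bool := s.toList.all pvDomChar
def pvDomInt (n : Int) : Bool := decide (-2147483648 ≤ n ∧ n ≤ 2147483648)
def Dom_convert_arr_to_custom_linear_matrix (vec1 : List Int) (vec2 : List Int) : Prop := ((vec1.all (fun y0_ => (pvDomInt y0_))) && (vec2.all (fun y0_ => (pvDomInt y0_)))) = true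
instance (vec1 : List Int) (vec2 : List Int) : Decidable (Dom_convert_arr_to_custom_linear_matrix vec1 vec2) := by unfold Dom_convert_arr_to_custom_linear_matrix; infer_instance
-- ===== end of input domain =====

-- B zero-initialises the matrix and writes only the nonzero diagonal band (one write per (column, vec1-entry)
-- pair), instead of A's per-cell scan with an in-band guard; equal return value proved on all inputs.

-- ===== PORT A =====
-- Literal port of A: zero matrix by comprehension, then the two counting while-loops as folds over the
-- counter ranges; each iteration overwrites cell (countHeight, countWidth) with the guarded vec1 lookup.
-- Loop counters are ≥ 0, so .toNat on them is exact.
def convert_arr_to_custom_linear_matrix (vec1 : List Int) (vec2 : List Int) : List (List Int) :=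
  let len1 : Int := vec1.length
  let len2 : Int := vec2.length
  let heightMatrix : Int := len1 + len2 - 1
  let widthMatrix : Int := len2
  let arr : List (List Int) :=
    (PySem.List.pyRange 0 heightMatrix 1).map (fun _ =>
      (PySem.List.pyRange 0 widthMatrix 1).map (fun _ => (0 : Int)))
  (PySem.List.pyRange 0 heightMatrix 1).foldl (fun arr countHeight =>
    (PySem.List.pyRange 0 widthMatrix 1).foldl (fun arr countWidth =>
      let v : Int :=
        if countHeight - countWidth < len1 ∧ countHeight - countWidth ≥ 0 then
          PySem.List.pyGetD vec1 (countHeight - countWidth) 0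
        else 0
      arr.set countHeight.toNat ((arr.getD countHeight.toNat []).set countWidth.toNat v)) arr) arr

-- ===== PORT B =====
-- Literal port of B: replicate-built zero matrix, then for each column j scatter vec1 down the
-- diagonal, arr[j+k][j] = vec1[k].  (range(len1+len2-1) on an empty total length is empty, as is
-- Nat subtraction here.)
def convert_arr_to_custom_linear_matrix_alt (vec1 : List Int) (vec2 : List Int) : List (List Int) :=
  let len1 : Nat := vec1.length
  let len2 : Nat := vec2.length
  let arr : List (List Int) := List.replicate (len1 + len2 - 1) (List.replicate len2 (0 : Int))
  (List.range len2).foldl (fun arr j =>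
    (List.range len1).foldl (fun arr k =>
      arr.set (j + k) ((arr.getD (j + k) []).set j (vec1.getD k 0))) arr) arr

-- ===== PRECONDITION & SPEC =====
def Spec_convert_arr_to_custom_linear_matrix (vec1 : List Int) (vec2 : List Int) (out : List (List Int)) : Prop := out = convert_arr_to_custom_linear_matrix_alt vec1 vec2
instance (vec1 : List Int) (vec2 : List Int) (out : List (List Int)) : Decidable (Spec_convert_arr_to_custom_linear_matrix vec1 vec2 out) := by unfold Spec_convert_arr_to_custom_linear_matrix; infer_instance

-- ===== CLAIM (what is proved, stated in full; the proofs are below) =====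
def Claim_equal_convert_arr_to_custom_linear_matrix : Prop := ∀ (vec1 : List Int) (vec2 : List Int), Dom_convert_arr_to_custom_linear_matrix vec1 vec2 → Spec_convert_arr_to_custom_linear_matrix vec1 vec2 (convert_arr_to_custom_linear_matrix vec1 vec2)

-- ===== LEMMAS AND PROOFS =====

-- common closed form both ports are reduced to
def pvTgt (vec1 vec2 : List Int) : List (List Int) :=
  (List.range (vec1.length + vec2.length - 1)).map (fun i =>
    (List.range vec2.length).map (fun j =>
      if j ≤ i ∧ i - j < vec1.length then vec1.getD (i - j) 0 else 0))

theorem pv_map_range_congr {α : Type} (n : Nat) (f g : Nat → α)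
    (h : ∀ i, i < n → f i = g i) : (List.range n).map f = (List.range n).map g :=
  List.map_congr_left (fun i hi => h i (List.mem_range.mp hi))

theorem pv_getD_map_range {α : Type} (n a : Nat) (f : Nat → α) (d : α) (ha : a < n) :
    ((List.range n).map f).getD a d = f a := by
  rw [List.getD_eq_getElem?_getD]
  simp [ha]

theorem pv_set_map_range {α : Type} (n a : Nat) (f : Nat → α) (x : α) (_ha : a < n) :
    ((List.range n).map f).set a x = (List.range n).map (fun i => if i = a then x else f i) := by
  apply List.ext_getElem (by simp)
  intro i h1 h2
  simp only [List.getElem_set, List.getElem_map, List.getElem_range]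
  simp only [List.length_set, List.length_map, List.length_range] at h1
  by_cases h : a = i <;> simp [h, Ne.symm]

theorem pv_fill_fold {α : Type} (d : α) (F : Nat → α → α) (M : List α) (n : Nat) (hn : n ≤ M.length) :
    (List.range n).foldl (fun arr i => arr.set i (F i (arr.getD i d))) M
      = (List.range n).map (fun i => F i (M.getD i d)) ++ M.drop n := by
  induction n with
  | zero => simp
  | succ n ih =>
    have hn' : n < M.length := by omega
    rw [List.range_succ, List.foldl_append, List.map_append, ih (by omega)]
    have hdrop : M.drop n = M[n] :: M.drop (n + 1) := List.drop_eq_getElem_cons hn'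
    have hlen : ((List.range n).map (fun i => F i (M.getD i d))).length = n := by simp
    rw [hdrop]
    have hget : (((List.range n).map (fun i => F i (M.getD i d))) ++ M[n] :: M.drop (n + 1)).getD n d = M[n] := by
      rw [List.getD_eq_getElem?_getD, List.getElem?_append_right (by omega), hlen]
      simp [List.getElem?_eq_getElem hn']
    have hMg : M.getD n d = M[n] := by
      rw [List.getD_eq_getElem?_getD]; simp [List.getElem?_eq_getElem hn']
    simp only [List.foldl_cons, List.foldl_nil, hget]
    rw [List.set_append, if_neg (by omega), hlen, Nat.sub_self, List.set_cons_zero]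
    simp [List.getElem?_eq_getElem hn']

theorem pv_fill_fold_const {α : Type} (d : α) (g : Nat → α) (M : List α) (n : Nat) (hn : n ≤ M.length) :
    (List.range n).foldl (fun row j => row.set j (g j)) M
      = (List.range n).map g ++ M.drop n := by
  simpa using pv_fill_fold d (fun j _ => g j) M n hn

theorem pv_matfold_eq_rowfold (js : List Nat) (i : Nat) (v : Nat → Int) (arr : List (List Int))
    (hi : i < arr.length) :
    js.foldl (fun arr j => arr.set i ((arr.getD i []).set j (v j))) arr
      = arr.set i (js.foldl (fun row j => row.set j (v j)) (arr.getD i [])) := by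
  induction js generalizing arr with
  | nil => simp [List.getElem?_eq_getElem hi, List.set_getElem_self]
  | cons j js ih =>
    simp only [List.foldl_cons]
    rw [ih _ (by simpa using hi)]
    have hg : (arr.set i ((arr.getD i []).set j (v j))).getD i [] = (arr.getD i []).set j (v j) := by
      rw [List.getD_eq_getElem?_getD, List.getElem?_set_self (by simpa using hi)]
      rfl
    rw [hg, List.set_set]

-- A's doubly-nested cell-by-cell fold, reduced to a row-by-row map
theorem pvA_fold (v : Nat → Nat → Int) (w n : Nat) (M : List (List Int)) (hn : n ≤ M.length) :
    (List.range n).foldl (fun arr i =>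
      (List.range w).foldl (fun arr j => arr.set i ((arr.getD i []).set j (v i j))) arr) M
    = (List.range n).map (fun i =>
        (List.range w).foldl (fun row j => row.set j (v i j)) (M.getD i [])) ++ M.drop n := by
  induction n with
  | zero => simp
  | succ n ih =>
    have hn' : n < M.length := by omega
    rw [List.range_succ, List.foldl_append, ih (by omega)]
    set P := (List.range n).map (fun i =>
        (List.range w).foldl (fun row j => row.set j (v i j)) (M.getD i [])) with hP
    have hlen : P.length = n := by simp [hP]
    have hdrop : M.drop n = M[n] :: M.drop (n + 1) := List.drop_eq_getElem_cons hn'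
    have hMg : M.getD n [] = M[n] := by
      rw [List.getD_eq_getElem?_getD]; simp [List.getElem?_eq_getElem hn']
    rw [hdrop]
    have hlen2 : (P ++ M[n] :: M.drop (n + 1)).length = M.length := by
      simp [hlen]; omega
    rw [List.foldl_cons, List.foldl_nil,
      pv_matfold_eq_rowfold _ n _ _ (by rw [hlen2]; exact hn')]
    have hget : (P ++ M[n] :: M.drop (n + 1)).getD n [] = M[n] := by
      rw [List.getD_eq_getElem?_getD, List.getElem?_append_right (by omega), hlen]
      simp [List.getElem?_eq_getElem hn']
    rw [hget, List.set_append, if_neg (by omega), hlen, Nat.sub_self, List.set_cons_zero]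
    simp [List.getD_eq_getElem?_getD, List.getElem?_eq_getElem hn']
    rw [hP]
    simp [List.getD_eq_getElem?_getD]

theorem pvA_eq_tgt (vec1 vec2 : List Int) :
    convert_arr_to_custom_linear_matrix vec1 vec2 = pvTgt vec1 vec2 := by
  unfold convert_arr_to_custom_linear_matrix pvTgt
  have hh : (((vec1.length : Int) + (vec2.length : Int) - 1) - 0).toNat
      = vec1.length + vec2.length - 1 := by omega
  have hw : (((vec2.length : Int)) - 0).toNat = vec2.length := by omega
  simp only [PySem.List.pyRange_one, hh, hw, List.foldl_map, List.map_map, Function.comp_def,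
    zero_add, Int.toNat_natCast]
  rw [pvA_fold _ _ _ _ (by simp)]
  rw [List.drop_eq_nil_of_le (by simp), List.append_nil]
  apply pv_map_range_congr
  intro i hi
  rw [pv_getD_map_range _ _ _ _ hi, pv_fill_fold_const (0 : Int) _ _ _ (by simp),
    List.drop_eq_nil_of_le (by simp), List.append_nil]
  apply pv_map_range_congr
  intro j hj
  by_cases hc : j ≤ i ∧ i - j < vec1.length
  · rw [if_pos (by omega), if_pos hc]
    have hij : ((i : Int) - (j : Int)) = ((i - j : Nat) : Int) := by omega
    rw [hij, PySem.List.pyGetD_natCast]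
  · rw [if_neg (by omega), if_neg hc]

-- B-side invariants: matrix after the first j columns / after m writes in column j
def pvCol (vec1 vec2 : List Int) (j : Nat) : List (List Int) :=
  (List.range (vec1.length + vec2.length - 1)).map (fun i =>
    (List.range vec2.length).map (fun c =>
      if c < j ∧ c ≤ i ∧ i - c < vec1.length then vec1.getD (i - c) 0 else 0))

def pvPart (vec1 vec2 : List Int) (j m : Nat) : List (List Int) :=
  (List.range (vec1.length + vec2.length - 1)).map (fun i =>
    (List.range vec2.length).map (fun c =>
      if c < j ∧ c ≤ i ∧ i - c < vec1.length then vec1.getD (i - c) 0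
      else if c = j ∧ j ≤ i ∧ i - j < m then vec1.getD (i - j) 0 else 0))

theorem pvB_inner (vec1 vec2 : List Int) (j : Nat) (hj : j < vec2.length)
    (m : Nat) (hm : m ≤ vec1.length) :
    (List.range m).foldl (fun arr k =>
      arr.set (j + k) ((arr.getD (j + k) []).set j (vec1.getD k 0))) (pvCol vec1 vec2 j)
    = pvPart vec1 vec2 j m := by
  induction m with
  | zero =>
    unfold pvCol pvPart
    simp
  | succ m ih =>
    have hjm : j + m < vec1.length + vec2.length - 1 := by omega
    rw [List.range_succ, List.foldl_append, ih (by omega), List.foldl_cons, List.foldl_nil]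
    unfold pvPart
    rw [pv_getD_map_range _ _ _ _ hjm, pv_set_map_range _ _ _ _ hj, pv_set_map_range _ _ _ _ hjm]
    apply pv_map_range_congr
    intro i hi
    by_cases hij : i = j + m
    · subst hij
      rw [if_pos rfl]
      apply pv_map_range_congr
      intro c hc
      by_cases hcj : c = j
      · subst hcj
        rw [if_pos rfl, if_neg (by omega), if_pos (by omega)]
        congr 1
        omega
      · rw [if_neg hcj]
        split_ifs with h1 h2 h3 h4 <;> first | rfl | omega
    · rw [if_neg hij]
      apply pv_map_range_congr
      intro c hc
      split_ifs with h1 h2 h3 h4 <;> first | rfl | omega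

theorem pvB_outer (vec1 vec2 : List Int) (j : Nat) (hj : j ≤ vec2.length) :
    (List.range j).foldl (fun arr j =>
      (List.range vec1.length).foldl (fun arr k =>
        arr.set (j + k) ((arr.getD (j + k) []).set j (vec1.getD k 0))) arr)
      (List.replicate (vec1.length + vec2.length - 1) (List.replicate vec2.length (0 : Int)))
    = pvCol vec1 vec2 j := by
  induction j with
  | zero =>
    unfold pvCol
    simp [List.map_const']
  | succ j ih =>
    rw [List.range_succ, List.foldl_append, ih (by omega), List.foldl_cons, List.foldl_nil,
      pvB_inner vec1 vec2 j (by omega) _ le_rfl]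
    unfold pvPart pvCol
    apply pv_map_range_congr
    intro i hi
    apply pv_map_range_congr
    intro c hc
    by_cases hcj : c = j
    · subst hcj
      rw [if_neg (by omega)]
      split_ifs with h1 h2 <;> first | rfl | omega
    · split_ifs with h1 h2 h3 h4 <;> first | rfl | omega

theorem pvB_eq_tgt (vec1 vec2 : List Int) :
    convert_arr_to_custom_linear_matrix_alt vec1 vec2 = pvTgt vec1 vec2 := by
  unfold convert_arr_to_custom_linear_matrix_alt
  rw [pvB_outer vec1 vec2 vec2.length le_rfl]
  unfold pvCol pvTgt
  apply pv_map_range_congr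
  intro i hi
  apply pv_map_range_congr
  intro c hc
  split_ifs with h1 h2 <;> first | rfl | omega

-- ===== VERDICT (by name: the statement is the Claim_ definition above) =====
theorem convert_arr_to_custom_linear_matrix_spec : Claim_equal_convert_arr_to_custom_linear_matrix := by
  intro vec1 vec2 _
  unfold Spec_convert_arr_to_custom_linear_matrix
  rw [pvA_eq_tgt, pvB_eq_tgt]
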